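-- pv_equiv track=rewrite | github.com/ducsiukap/Python_codeptit | ICPC0107.py | calc
-- ===== SOURCE A (Python) =====
-- def _sum(x1): # int[] array -> int number
--     # [1, 2] -> 12
--     res = 0
--     for i in range(0, len(x1)):
--         res = res * 10 + x1[i]
--     return res
--
-- def calc(x1, x2, p, q):
--     n1, n2 = len(x1), len(x2)
--     X1 = []
--     X2 = []
--     for i in range(0, n1):
--         if x1[i] == p:
--             X1.append(int(q))
--         else: X1.append(int(x1[i]))
--     for i in range(0, n2):
--         if x2[i] == p:
--             X2.append(int(q))
--         else: X2.append(int(x2[i]))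
--     return _sum(X1) + _sum(X2)
-- ===== SOURCE B (Python) =====
-- def calc(x1, x2, p, q):
--     def horner(xs):
--         r = 0
--         for d in xs:
--             r = 10 * r + (q if d == p else d)
--         return r
--     return horner(x1) + horner(x2)
-- ===== Notes on version B (the rewrite author's own statement) =====
-- stated objective: simpler
-- what changed: Fuses A's two phases (build a replaced-digit list, then Horner-sum it) into one single Horner pass per input list, dropping the _sum helper and the intermediate lists.
import Mathlib
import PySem

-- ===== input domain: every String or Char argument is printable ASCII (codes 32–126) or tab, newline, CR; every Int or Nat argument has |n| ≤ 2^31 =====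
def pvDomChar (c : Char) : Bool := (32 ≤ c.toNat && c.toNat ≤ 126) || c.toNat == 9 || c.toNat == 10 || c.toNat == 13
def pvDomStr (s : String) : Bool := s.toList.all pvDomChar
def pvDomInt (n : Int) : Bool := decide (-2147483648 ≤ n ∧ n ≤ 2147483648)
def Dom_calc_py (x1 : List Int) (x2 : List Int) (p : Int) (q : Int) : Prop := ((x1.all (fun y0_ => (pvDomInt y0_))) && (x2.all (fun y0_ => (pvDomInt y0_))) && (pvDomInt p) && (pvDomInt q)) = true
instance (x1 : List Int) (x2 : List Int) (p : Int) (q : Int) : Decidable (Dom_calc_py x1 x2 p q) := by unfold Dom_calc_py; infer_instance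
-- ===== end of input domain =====

-- B fuses A's two phases (build replaced-digit lists, then Horner-sum them) into one Horner pass per list; objective: simpler.


-- ===== PORT A =====
-- _sum: Horner-fold over the list (the Python for-loop over range(0,len) reading x1[i])
def pvSumA (xs : List Int) : Int := xs.foldl (fun res d => res * 10 + d) 0

-- the two build loops of calc: append the replaced digit, same branch order
def pvBuildA (xs : List Int) (p q : Int) : List Int :=
  xs.foldl (fun acc d => if d == p then acc ++ [q] else acc ++ [d]) []

def calc_py (x1 : List Int) (x2 : List Int) (p : Int) (q : Int) : Int :=
  pvSumA (pvBuildA x1 p q) + pvSumA (pvBuildA x2 p q)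

-- ===== PORT B =====
-- B's fused single-pass horner helper
def pvHornerB (xs : List Int) (p q : Int) : Int :=
  xs.foldl (fun r d => 10 * r + (if d == p then q else d)) 0

def calc_py_alt (x1 : List Int) (x2 : List Int) (p : Int) (q : Int) : Int :=
  pvHornerB x1 p q + pvHornerB x2 p q

-- ===== PRECONDITION & SPEC =====
def Spec_calc_py (x1 : List Int) (x2 : List Int) (p : Int) (q : Int) (out : Int) : Prop := out = calc_py_alt x1 x2 p q
instance (x1 : List Int) (x2 : List Int) (p : Int) (q : Int) (out : Int) : Decidable (Spec_calc_py x1 x2 p q out) := by unfold Spec_calc_py; infer_instance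

-- ===== CLAIM (what is proved, stated in full; the proofs are below) =====
def Claim_equal_calc_py : Prop := ∀ (x1 : List Int) (x2 : List Int) (p : Int) (q : Int), Dom_calc_py x1 x2 p q → Spec_calc_py x1 x2 p q (calc_py x1 x2 p q)

-- ===== LEMMAS AND PROOFS =====
-- the build loop produces a map of the replacement function
theorem pvBuildA_from (xs : List Int) (p q : Int) (acc : List Int) :
    xs.foldl (fun acc d => if d == p then acc ++ [q] else acc ++ [d]) acc
      = acc ++ xs.map (fun d => if d == p then q else d) := by
  induction xs generalizing acc with
  | nil => simp
  | cons a t ih =>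
    simp only [List.foldl, List.map]
    rw [ih]
    by_cases h : a = p <;> simp [h]

-- Horner over a mapped list equals the fused fold, for any starting accumulator
theorem pvHorner_map (xs : List Int) (f : Int → Int) (r : Int) :
    (xs.map f).foldl (fun res d => res * 10 + d) r
      = xs.foldl (fun res d => 10 * res + f d) r := by
  induction xs generalizing r with
  | nil => rfl
  | cons a t ih => simp only [List.map, List.foldl]; rw [ih, Int.mul_comm]

theorem calc_eq (x1 x2 : List Int) (p q : Int) :
    calc_py x1 x2 p q = calc_py_alt x1 x2 p q := by
  simp only [calc_py, calc_py_alt, pvSumA, pvBuildA, pvHornerB, pvBuildA_from,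
    List.nil_append, pvHorner_map]

-- ===== VERDICT (by name: the statement is the Claim_ definition above) =====
theorem calc_py_spec : Claim_equal_calc_py := by
  intro x1 x2 p q _
  exact calc_eq x1 x2 p q
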